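-- pv_equiv track=rewrite | github.com/basetenlabs/truss-examples | image/flux-dev-trt-b200/load_test.py | get_varied_prompts
-- ===== SOURCE A (Python) =====
-- from typing import List, Dict, Any
--
-- def get_varied_prompts(num_prompts: int) -> List[str]:
--     """Generate a list of varied prompts for load testing."""
--     base_prompts = [
--         "a beautiful photograph of Mt. Fuji during cherry blossom, photorealistic, high quality",
--         "a majestic dragon soaring through a mystical forest, digital art, detailed",
--         "a cozy coffee shop interior with warm lighting, people working on laptops, photorealistic",
--         "a futuristic cityscape at sunset with flying cars and neon lights, cinematic",
--         "a serene mountain lake reflecting snow-capped peaks, nature photography, high resolution",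
--         "a steampunk airship floating above Victorian-era buildings, detailed illustration",
--         "a magical library with floating books and glowing crystals, fantasy art",
--         "a peaceful Japanese garden with koi pond and cherry blossoms, traditional art style",
--         "a cyberpunk street scene with neon signs and rain, Blade Runner style",
--         "a whimsical treehouse village connected by rope bridges, children's book illustration",
--         "a dramatic storm over the ocean with lightning and waves, nature photography",
--         "a cozy cabin in the woods with smoke from chimney, winter scene, photorealistic",
--         "a space station orbiting Earth with stars and nebula in background, sci-fi art",
--         "a bustling medieval marketplace with merchants and colorful stalls, fantasy",
--         "a tranquil zen meditation room with candles and incense, minimalist design",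
--         "a roaring waterfall in a tropical jungle with exotic birds, nature photography",
--         "a steampunk robot butler serving tea in a Victorian parlor, detailed illustration",
--         "a magical crystal cave with glowing formations and underground lake, fantasy",
--         "a peaceful farm at golden hour with rolling hills and grazing animals, pastoral",
--         "a futuristic robot city with advanced technology and clean architecture, sci-fi",
--     ]
--
--     # If we need more prompts than we have, cycle through them
--     if num_prompts <= len(base_prompts):
--         return base_prompts[:num_prompts]
--     else:
--         # Cycle through prompts and add variations
--         prompts = []
--         for i in range(num_prompts):
--             base_prompt = base_prompts[i % len(base_prompts)]
--             if i >= len(base_prompts):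
--                 # Add variation number for additional prompts
--                 variation_num = (i // len(base_prompts)) + 1
--                 prompts.append(f"{base_prompt} (variation {variation_num})")
--             else:
--                 prompts.append(base_prompt)
--         return prompts
-- ===== SOURCE B (Python) =====
-- from typing import List
--
-- def get_varied_prompts(num_prompts: int) -> List[str]:
--     """Generate a list of varied prompts for load testing."""
--     base_prompts = [
--         "a beautiful photograph of Mt. Fuji during cherry blossom, photorealistic, high quality",
--         "a majestic dragon soaring through a mystical forest, digital art, detailed",
--         "a cozy coffee shop interior with warm lighting, people working on laptops, photorealistic",
--         "a futuristic cityscape at sunset with flying cars and neon lights, cinematic",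
--         "a serene mountain lake reflecting snow-capped peaks, nature photography, high resolution",
--         "a steampunk airship floating above Victorian-era buildings, detailed illustration",
--         "a magical library with floating books and glowing crystals, fantasy art",
--         "a peaceful Japanese garden with koi pond and cherry blossoms, traditional art style",
--         "a cyberpunk street scene with neon signs and rain, Blade Runner style",
--         "a whimsical treehouse village connected by rope bridges, children's book illustration",
--         "a dramatic storm over the ocean with lightning and waves, nature photography",
--         "a cozy cabin in the woods with smoke from chimney, winter scene, photorealistic",
--         "a space station orbiting Earth with stars and nebula in background, sci-fi art",
--         "a bustling medieval marketplace with merchants and colorful stalls, fantasy",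
--         "a tranquil zen meditation room with candles and incense, minimalist design",
--         "a roaring waterfall in a tropical jungle with exotic birds, nature photography",
--         "a steampunk robot butler serving tea in a Victorian parlor, detailed illustration",
--         "a magical crystal cave with glowing formations and underground lake, fantasy",
--         "a peaceful farm at golden hour with rolling hills and grazing animals, pastoral",
--         "a futuristic robot city with advanced technology and clean architecture, sci-fi",
--     ]
--     n = len(base_prompts)
--     if num_prompts <= n:
--         return base_prompts[:num_prompts]
--     # build whole cycles (cycle c gets suffix "(variation c)"), then truncate
--     cycles = -(-num_prompts // n)  # ceil division
--     out = list(base_prompts)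
--     for c in range(2, cycles + 1):
--         out.extend(f"{p} (variation {c})" for p in base_prompts)
--     return out[:num_prompts]
-- ===== Notes on version B (the rewrite author's own statement) =====
-- stated objective: alternative
-- what changed: Replaces A's single flat loop with per-index i%len and i//len arithmetic by whole-cycle chunk construction (base list, then one full variation block per extra cycle computed by ceil division) followed by a final truncation.
import Mathlib
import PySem

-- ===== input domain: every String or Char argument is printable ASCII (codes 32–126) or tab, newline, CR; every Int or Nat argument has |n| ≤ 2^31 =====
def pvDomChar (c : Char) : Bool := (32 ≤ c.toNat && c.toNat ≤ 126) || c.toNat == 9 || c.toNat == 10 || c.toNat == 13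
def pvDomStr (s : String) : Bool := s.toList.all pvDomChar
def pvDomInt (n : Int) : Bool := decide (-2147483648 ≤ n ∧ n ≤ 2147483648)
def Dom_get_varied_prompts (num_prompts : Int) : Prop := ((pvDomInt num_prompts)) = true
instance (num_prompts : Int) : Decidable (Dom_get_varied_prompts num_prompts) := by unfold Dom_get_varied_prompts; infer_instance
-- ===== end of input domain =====

-- B replaces A's flat loop with its per-index i%len / i//len arithmetic by whole-cycle
-- chunk construction (one variation block per extra cycle, count by ceil division) plus a
-- final truncation: an alternative decomposition of the same task, same cost.

-- the base prompt list both Python versions carry verbatim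
def pvBasePrompts : List String := [
  "a beautiful photograph of Mt. Fuji during cherry blossom, photorealistic, high quality",
  "a majestic dragon soaring through a mystical forest, digital art, detailed",
  "a cozy coffee shop interior with warm lighting, people working on laptops, photorealistic",
  "a futuristic cityscape at sunset with flying cars and neon lights, cinematic",
  "a serene mountain lake reflecting snow-capped peaks, nature photography, high resolution",
  "a steampunk airship floating above Victorian-era buildings, detailed illustration",
  "a magical library with floating books and glowing crystals, fantasy art",
  "a peaceful Japanese garden with koi pond and cherry blossoms, traditional art style",
  "a cyberpunk street scene with neon signs and rain, Blade Runner style",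
  "a whimsical treehouse village connected by rope bridges, children's book illustration",
  "a dramatic storm over the ocean with lightning and waves, nature photography",
  "a cozy cabin in the woods with smoke from chimney, winter scene, photorealistic",
  "a space station orbiting Earth with stars and nebula in background, sci-fi art",
  "a bustling medieval marketplace with merchants and colorful stalls, fantasy",
  "a tranquil zen meditation room with candles and incense, minimalist design",
  "a roaring waterfall in a tropical jungle with exotic birds, nature photography",
  "a steampunk robot butler serving tea in a Victorian parlor, detailed illustration",
  "a magical crystal cave with glowing formations and underground lake, fantasy",
  "a peaceful farm at golden hour with rolling hills and grazing animals, pastoral",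
  "a futuristic robot city with advanced technology and clean architecture, sci-fi"]

-- ===== PORT A =====
def get_varied_prompts (num_prompts : Int) : List String :=
  let base_prompts := pvBasePrompts
  if num_prompts ≤ (base_prompts.length : Int) then
    PySem.List.slice base_prompts none (some num_prompts)
  else
    (PySem.List.pyRange 0 num_prompts 1).foldl
      (fun prompts i =>
        -- base_prompts[i % len] is always in range: pyGetD is exact here
        let base_prompt := PySem.List.pyGetD base_prompts (PySem.Int.mod i (base_prompts.length : Int)) ""
        if (base_prompts.length : Int) ≤ i then
          let variation_num := PySem.Int.floordiv i (base_prompts.length : Int) + 1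
          prompts ++ [base_prompt ++ " (variation " ++ PySem.Int.toStr variation_num ++ ")"]
        else
          prompts ++ [base_prompt]) []

-- ===== PORT B =====
def get_varied_prompts_alt (num_prompts : Int) : List String :=
  let base_prompts := pvBasePrompts
  let n : Int := base_prompts.length
  if num_prompts ≤ n then
    PySem.List.slice base_prompts none (some num_prompts)
  else
    let cycles := -(PySem.Int.floordiv (-num_prompts) n)  -- ceil division
    let out := (PySem.List.pyRange 2 (cycles + 1) 1).foldl
      (fun out c =>
        out ++ base_prompts.map (fun p => p ++ " (variation " ++ PySem.Int.toStr c ++ ")"))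
      base_prompts
    PySem.List.slice out none (some num_prompts)

-- ===== PRECONDITION & SPEC =====
def Spec_get_varied_prompts (num_prompts : Int) (out : List String) : Prop := out = get_varied_prompts_alt num_prompts
instance (num_prompts : Int) (out : List String) : Decidable (Spec_get_varied_prompts num_prompts out) := by unfold Spec_get_varied_prompts; infer_instance

-- ===== CLAIM (what is proved, stated in full; the proofs are below) =====
def Claim_equal_get_varied_prompts : Prop := ∀ (num_prompts : Int), Dom_get_varied_prompts num_prompts → Spec_get_varied_prompts num_prompts (get_varied_prompts num_prompts)

-- ===== LEMMAS AND PROOFS =====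

-- the per-index value A appends at position i (for i ≥ 0)
def pvF (i : Int) : String :=
  let bp := PySem.List.pyGetD pvBasePrompts (PySem.Int.mod i 20) ""
  if (20 : Int) ≤ i then
    bp ++ " (variation " ++ PySem.Int.toStr (PySem.Int.floordiv i 20 + 1) ++ ")"
  else
    bp

lemma pvBase_len : (pvBasePrompts.length : Int) = 20 := by decide

-- A's else-branch loop is a map of pvF over the index range
lemma pvA_eq_map (n : Int) (h : (20 : Int) < n) :
    get_varied_prompts n = (PySem.List.pyRange 0 n 1).map pvF := by
  simp only [get_varied_prompts]
  rw [pvBase_len, if_neg (by omega)]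
  have hfun : (fun (prompts : List String) (i : Int) =>
      if (20:Int) ≤ i then
        prompts ++ [PySem.List.pyGetD pvBasePrompts (PySem.Int.mod i (20:Int)) ""
          ++ " (variation " ++ PySem.Int.toStr (PySem.Int.floordiv i 20 + 1) ++ ")"]
      else prompts ++ [PySem.List.pyGetD pvBasePrompts (PySem.Int.mod i (20:Int)) ""])
      = fun prompts i => prompts ++ [pvF i] := by
    funext prompts i
    by_cases hi : (20 : Int) ≤ i <;> simp only [pvF, hi, if_pos, ite_false]
  rw [hfun, PySem.List.foldl_append_singleton_eq_map]
  simp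

-- the first 20 indices reproduce the base list
lemma pvF_first_cycle : (PySem.List.pyRange 0 20 1).map pvF = pvBasePrompts := by
  have h20 : PySem.List.len pvBasePrompts = (20 : Int) := by decide
  have hbase := PySem.List.map_pyGetD_pyRange_zero pvBasePrompts ""
  rw [h20] at hbase
  rw [← hbase]
  apply List.map_congr_left
  intro i hi
  rw [PySem.List.mem_pyRange_one] at hi
  have hm : PySem.Int.mod i 20 = i := by
    rw [PySem.Int.mod_eq_emod_of_pos (by omega)]; omega
  have hlt : ¬ ((20:Int) ≤ i) := by omega
  simp only [pvF, hm, if_neg hlt]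

-- cycle m (m ≥ 1) of indices maps to the "(variation m+1)" block
lemma pvF_cycle (m : Int) (hm : 1 ≤ m) :
    (PySem.List.pyRange (20*m) (20*m + 20) 1).map pvF
      = pvBasePrompts.map (fun p => p ++ " (variation " ++ PySem.Int.toStr (m+1) ++ ")") := by
  have h20 : PySem.List.len pvBasePrompts = (20 : Int) := by decide
  have hbase := PySem.List.map_pyGetD_pyRange_zero pvBasePrompts ""
  rw [h20] at hbase
  conv_rhs => rw [← hbase]
  rw [PySem.List.pyRange_one (20*m) (20*m+20), PySem.List.pyRange_one 0 20]
  rw [List.map_map, List.map_map, List.map_map]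
  rw [show ((20*m+20 - 20*m : Int)).toNat = ((20:Int) - 0).toNat from by omega]
  apply List.map_congr_left
  intro k hk
  rw [List.mem_range] at hk
  have hkn : (k : Int) < 20 := by omega
  simp only [Function.comp]
  have hmod : PySem.Int.mod (20*m + (k:Int)) 20 = (k:Int) := by
    rw [PySem.Int.mod_eq_emod_of_pos (by omega)]; omega
  have hdiv : PySem.Int.floordiv (20*m + (k:Int)) 20 = m := by
    rw [PySem.Int.floordiv_eq_ediv_of_pos (by omega)]; omega
  have hge : (20:Int) ≤ 20*m + (k:Int) := by omega
  simp only [pvF, hmod, hdiv, if_pos hge, zero_add]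

-- B's cycle loop, run for c cycles, equals pvF mapped over the first 20*c indices
lemma pvB_loop (c : Nat) (hc : 1 ≤ c) :
    (PySem.List.pyRange 2 ((c:Int) + 1) 1).foldl
      (fun out x => out ++ pvBasePrompts.map (fun p => p ++ " (variation " ++ PySem.Int.toStr x ++ ")"))
      pvBasePrompts
    = (PySem.List.pyRange 0 (20*(c:Int)) 1).map pvF := by
  induction c with
  | zero => omega
  | succ k ih =>
    push_cast
    by_cases hk : 1 ≤ k
    · have h2k : (2:Int) ≤ (k:Int) + 1 := by omega
      rw [PySem.List.pyRange_one_succ_right h2k, List.foldl_append]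
      have ih' := ih hk
      push_cast at ih'
      rw [ih']
      rw [show (20*((k:Int)+1) : Int) = (20*(k:Int)) + 20 from by ring]
      rw [PySem.List.pyRange_one_append 0 (20*(k:Int)) (20*(k:Int)+20) (by omega) (by omega),
          List.map_append]
      simp only [List.foldl]
      rw [pvF_cycle (k:Int) (by exact_mod_cast hk)]
    · have hk0 : k = 0 := by omega
      subst hk0
      rw [show ((0:Nat):Int) + 1 + 1 = (2:Int) from by norm_num,
          PySem.List.pyRange_one_eq_nil (by norm_num)]
      simp only [List.foldl]
      rw [show (20*(((0:Nat):Int) + 1) : Int) = (20:Int) from by norm_num]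
      exact pvF_first_cycle.symm

-- taking the first n of a longer index range truncates the range
lemma pvTake_range (n m : Int) (h0 : 0 ≤ n) (hnm : n ≤ m) :
    List.take n.toNat ((PySem.List.pyRange 0 m 1).map pvF)
      = (PySem.List.pyRange 0 n 1).map pvF := by
  rw [PySem.List.pyRange_one_append 0 n m h0 hnm, List.map_append]
  have hlen : ((PySem.List.pyRange 0 n 1).map pvF).length = n.toNat := by
    rw [List.length_map, PySem.List.length_pyRange_one]; omega
  rw [← hlen, List.take_left]

-- ===== VERDICT (by name: the statement is the Claim_ definition above) =====
theorem get_varied_prompts_spec : Claim_equal_get_varied_prompts := by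
  intro n _
  unfold Spec_get_varied_prompts
  by_cases h : n ≤ (20 : Int)
  · simp only [get_varied_prompts, get_varied_prompts_alt]
    rw [pvBase_len, if_pos h, if_pos h]
  · have h' : (20:Int) < n := by omega
    rw [pvA_eq_map n h']
    simp only [get_varied_prompts_alt]
    rw [pvBase_len, if_neg (by omega)]
    set cyc : Int := -(PySem.Int.floordiv (-n) 20) with hcyc
    have hdiv : cyc = -((-n) / 20) := by
      rw [hcyc, PySem.Int.floordiv_eq_ediv_of_pos (by omega)]
    have hcyc2 : 2 ≤ cyc := by omega
    have hncyc : n ≤ 20 * cyc := by omega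
    have hcn : cyc = ((cyc.toNat : Nat) : Int) := by omega
    rw [hcn, pvB_loop cyc.toNat (by omega),
        PySem.List.slice_to _ (by omega : (0:Int) ≤ n),
        pvTake_range n (20*((cyc.toNat : Nat):Int)) (by omega) (by omega)]
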